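-- pv_equiv track=rewrite | github.com/powera/atacama | tools/guid_migration/validate_migration.py | is_valid_guid
-- ===== SOURCE A (Python) =====
-- from typing import Dict, Any, List, Set
--
-- def is_valid_guid(guid: str, valid_guids: Set[str]) -> bool:
--     """
--     Check if a GUID is valid.
--
--     Args:
--         guid: GUID to validate
--         valid_guids: Set of all valid GUIDs from mapping table
--
--     Returns:
--         True if valid, False otherwise
--     """
--     # Check if it's in our known GUIDs
--     if guid in valid_guids:
--         return True
--
--     # Check format (e.g., N02_001, V01_042, P03_015)
--     # Format: Letter(s) + digits + underscore + digits
--     if len(guid) < 5: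
--         return False
--
--     parts = guid.split('_')
--     if len(parts) != 2:
--         return False
--
--     prefix, suffix = parts
--
--     # Prefix should start with letter(s) followed by digits
--     if not prefix or not suffix:
--         return False
--
--     # Find where letters end and digits begin in prefix
--     letter_part = ""
--     digit_part = ""
--     for char in prefix:
--         if char.isalpha():
--             if digit_part:  # Letters after digits is invalid
--                 return False
--             letter_part += char
--         elif char.isdigit():
--             digit_part += char
--         else:
--             return False
--
--     # Suffix should be all digits
--     if not suffix.isdigit():
--         return False
--
--     # Both parts should exist
--     return bool(letter_part) and bool(digit_part)
-- ===== SOURCE B (Python) =====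
-- def is_valid_guid(guid: str, valid_guids) -> bool:
--     if guid in valid_guids:
--         return True
--     if len(guid) < 5:
--         return False
--     parts = guid.split('_')
--     if len(parts) != 2:
--         return False
--     prefix, suffix = parts
--     if not prefix or not suffix:
--         return False
--     # boundary index: number of leading alphabetic characters of prefix
--     i = 0
--     while i < len(prefix) and prefix[i].isalpha():
--         i += 1
--     letter_part, digit_part = prefix[:i], prefix[i:]
--     return bool(letter_part) and bool(digit_part) and digit_part.isdigit() and suffix.isdigit()
-- ===== Notes on version B (the rewrite author's own statement) =====
-- stated objective: simpler
-- what changed: Replaced the char-by-char state machine (letter/digit accumulators plus a letters-after-digits flag with early returns) by computing the letter/digit boundary index, slicing the prefix there, and checking digit_part.isdigit().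
import Mathlib
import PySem

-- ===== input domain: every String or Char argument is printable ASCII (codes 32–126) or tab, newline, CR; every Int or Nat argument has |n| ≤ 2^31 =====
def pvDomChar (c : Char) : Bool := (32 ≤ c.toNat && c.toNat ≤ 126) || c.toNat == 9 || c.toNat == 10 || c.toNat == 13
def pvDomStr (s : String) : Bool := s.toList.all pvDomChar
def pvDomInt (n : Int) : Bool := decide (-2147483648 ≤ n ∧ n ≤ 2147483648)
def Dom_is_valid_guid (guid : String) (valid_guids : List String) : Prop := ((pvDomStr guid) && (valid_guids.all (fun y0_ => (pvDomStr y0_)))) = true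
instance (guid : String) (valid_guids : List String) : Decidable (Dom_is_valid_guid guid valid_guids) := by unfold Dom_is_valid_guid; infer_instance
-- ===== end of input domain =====

-- B computes the letter/digit boundary of the prefix and slices, instead of A's accumulator loop with a flag; objective: simpler.


-- ===== PORT A =====
-- A's for-loop over prefix with letter_part/digit_part accumulators; none = early 'return False'
def pvLoopA : List Char → List Char → List Char → Option (List Char × List Char)
  | [], lp, dp => some (lp, dp)
  | c :: cs, lp, dp =>
    if PySem.Chars.isalpha c then
      if !dp.isEmpty then none
      else pvLoopA cs (lp ++ [c]) dp
    else if PySem.Chars.isdigit c then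
      pvLoopA cs lp (dp ++ [c])
    else none

def is_valid_guid (guid : String) (valid_guids : List String) : Bool :=
  if valid_guids.contains guid then true
  else if PySem.Str.len guid < 5 then false
  else
    let parts := PySem.Chars.splitOn guid.toList ['_']
    if parts.length ≠ 2 then false
    else
      let pre := parts[0]!
      let suf := parts[1]!
      if pre.isEmpty || suf.isEmpty then false
      else
        match pvLoopA pre [] [] with
        | none => false
        | some (lp, dp) =>
          if !PySem.Chars.strIsdigit suf then false
          else !lp.isEmpty && !dp.isEmpty

-- ===== PORT B =====
-- Source B's while loop counting leading alphabetic chars of prefix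
def pvBoundary : List Char → Nat
  | [] => 0
  | c :: cs => if PySem.Chars.isalpha c then pvBoundary cs + 1 else 0

def is_valid_guid_alt (guid : String) (valid_guids : List String) : Bool :=
  if valid_guids.contains guid then true
  else if PySem.Str.len guid < 5 then false
  else
    let parts := PySem.Chars.splitOn guid.toList ['_']
    if parts.length ≠ 2 then false
    else
      let pre := parts[0]!
      let suf := parts[1]!
      if pre.isEmpty || suf.isEmpty then false
      else
        let i := pvBoundary pre
        -- prefix[:i] / prefix[i:] with 0 ≤ i ≤ len(prefix): exactly take/drop
        let lp := pre.take i
        let dp := pre.drop i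
        !lp.isEmpty && !dp.isEmpty && PySem.Chars.strIsdigit dp && PySem.Chars.strIsdigit suf

-- ===== PRECONDITION & SPEC =====
def Spec_is_valid_guid (guid : String) (valid_guids : List String) (out : Bool) : Prop := out = is_valid_guid_alt guid valid_guids
instance (guid : String) (valid_guids : List String) (out : Bool) : Decidable (Spec_is_valid_guid guid valid_guids out) := by unfold Spec_is_valid_guid; infer_instance

-- ===== CLAIM (what is proved, stated in full; the proofs are below) =====
def Claim_equal_is_valid_guid : Prop := ∀ (guid : String) (valid_guids : List String), Dom_is_valid_guid guid valid_guids → Spec_is_valid_guid guid valid_guids (is_valid_guid guid valid_guids)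

-- ===== LEMMAS AND PROOFS =====

theorem pvCharVals : ('0' : Char).val.toNat = 48 ∧ ('9' : Char).val.toNat = 57 ∧
    ('A' : Char).val.toNat = 65 ∧ ('Z' : Char).val.toNat = 90 ∧
    ('a' : Char).val.toNat = 97 ∧ ('z' : Char).val.toNat = 122 := by decide

theorem pvAlpha_not_digit {c : Char} (h : PySem.Chars.isalpha c = true) :
    PySem.Chars.isdigit c = false := by
  obtain ⟨h0, h9, hA, hZ, ha, hz⟩ := pvCharVals
  simp only [PySem.Chars.isdigit, PySem.Chars.isalpha, PySem.Chars.isupper, PySem.Chars.islower,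
    Char.le_def, UInt32.le_iff_toNat_le, Bool.and_eq_true, Bool.or_eq_true,
    decide_eq_true_eq] at *
  simp only [Bool.and_eq_false_iff, decide_eq_false_iff_not, not_le]
  omega

theorem pvBoolCore (a b s : Bool) :
    (if (!s) = true then false else a && b) = (a && b && (b && true) && s) := by
  cases a <;> cases b <;> cases s <;> rfl

theorem pvLoopA_phase2 (cs : List Char) (lp dp : List Char) (h : dp ≠ []) :
    pvLoopA cs lp dp =
      if cs.all PySem.Chars.isdigit then some (lp, dp ++ cs) else none := by
  induction cs generalizing dp with
  | nil => simp [pvLoopA]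
  | cons c cs ih =>
    by_cases ha : PySem.Chars.isalpha c = true
    · have hd := pvAlpha_not_digit ha
      simp [pvLoopA, ha, h, hd]
    · by_cases hdig : PySem.Chars.isdigit c = true
      · simp [pvLoopA, ha, hdig, ih (dp ++ [c]) (by simp)]
      · simp [pvLoopA, ha, hdig]

theorem pvLoopA_phase1 (cs : List Char) (lp : List Char) :
    pvLoopA cs lp [] =
      if (cs.dropWhile PySem.Chars.isalpha).all PySem.Chars.isdigit then
        some (lp ++ cs.takeWhile PySem.Chars.isalpha, cs.dropWhile PySem.Chars.isalpha)
      else none := by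
  induction cs generalizing lp with
  | nil => simp [pvLoopA]
  | cons c cs ih =>
    by_cases ha : PySem.Chars.isalpha c = true
    · simp [pvLoopA, ha, ih (lp ++ [c])]
    · by_cases hdig : PySem.Chars.isdigit c = true
      · simp [pvLoopA, ha, hdig,
          pvLoopA_phase2 cs lp [c] (by simp)]
      · simp [pvLoopA, ha, hdig]

theorem pvBoundary_eq (cs : List Char) :
    pvBoundary cs = (cs.takeWhile PySem.Chars.isalpha).length := by
  induction cs with
  | nil => rfl
  | cons c cs ih =>
    by_cases ha : PySem.Chars.isalpha c = true <;>
      simp [pvBoundary, ha, ih]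

theorem pvTake_boundary (cs : List Char) :
    cs.take (cs.takeWhile PySem.Chars.isalpha).length = cs.takeWhile PySem.Chars.isalpha := by
  induction cs with
  | nil => rfl
  | cons c cs ih =>
    by_cases ha : PySem.Chars.isalpha c = true <;>
      simp [ha, ih]

theorem pvDrop_boundary (cs : List Char) :
    cs.drop (cs.takeWhile PySem.Chars.isalpha).length = cs.dropWhile PySem.Chars.isalpha := by
  induction cs with
  | nil => rfl
  | cons c cs ih =>
    by_cases ha : PySem.Chars.isalpha c = true <;>
      simp [ha, ih]

theorem pvCore (cs suf : List Char) :
    (match pvLoopA cs [] [] with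
     | none => false
     | some (lp, dp) =>
        if !PySem.Chars.strIsdigit suf then false
        else !lp.isEmpty && !dp.isEmpty) =
    (!(cs.take (pvBoundary cs)).isEmpty && !(cs.drop (pvBoundary cs)).isEmpty &&
      PySem.Chars.strIsdigit (cs.drop (pvBoundary cs)) && PySem.Chars.strIsdigit suf) := by
  rw [pvLoopA_phase1, pvBoundary_eq, pvTake_boundary, pvDrop_boundary]
  by_cases h : (cs.dropWhile PySem.Chars.isalpha).all PySem.Chars.isdigit = true
  · simp only [h, if_pos, List.nil_append, PySem.Chars.strIsdigit]
    exact pvBoolCore _ _ _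
  · simp [PySem.Chars.strIsdigit, h]

-- ===== VERDICT (by name: the statement is the Claim_ definition above) =====
theorem is_valid_guid_spec : Claim_equal_is_valid_guid := by
  intro guid valid_guids _
  unfold Spec_is_valid_guid is_valid_guid is_valid_guid_alt
  simp only [pvCore]
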